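-- pv_equiv track=rewrite | github.com/yaeba/binary-search-solutions | solutions/List-Partitioning-with-Inequality-Relation.py | solve
-- ===== SOURCE A (Python) =====
-- def solve(nums):
--     if not nums:
--         return None
--
--     # find left_max at every index
--     left_max = [nums[0]]
--     for num in nums[1:]:
--         left_max.append(max(num, left_max[-1]))
--
--     # find right_min at every index
--     right_min = [nums[-1]]
--     for num in nums[-2::-1]:
--         right_min.append(min(num, right_min[-1]))
--     right_min = right_min[::-1]
--
--     # find first occurrence of left_max <= right_min
--     for idx, (a, b) in enumerate(zip(left_max, right_min[1:])):
--         if a <= b: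
--             return idx + 1
--
--     return None
-- ===== SOURCE B (Python) =====
-- def solve(nums):
--     # One forward pass, O(1) extra space (no prefix/suffix arrays, no reversal):
--     # classic "partition disjoint" scan.  cut is the best split so far, cut_max
--     # the max of nums[:cut], seen_max the max of everything processed.
--     if not nums:
--         return None
--     i = 1
--     cut = 1
--     cut_max = nums[0]
--     seen_max = nums[0]
--     for x in nums[1:]:
--         if x < cut_max:
--             cut = i + 1
--             cut_max = seen_max
--         elif x > seen_max:
--             seen_max = x
--         i += 1
--     return cut if cut < len(nums) else None
-- ===== Notes on version B (the rewrite author's own statement) =====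
-- stated objective: faster
-- what changed: Replaces A's three-pass construction of a prefix-max array and a reversed suffix-min array plus a zip scan with a single forward pass that keeps only three scalars (best cut, max of the left part, max of everything seen), using the invariant that the first valid split is one past the last element smaller than the running left max.
import Mathlib
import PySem

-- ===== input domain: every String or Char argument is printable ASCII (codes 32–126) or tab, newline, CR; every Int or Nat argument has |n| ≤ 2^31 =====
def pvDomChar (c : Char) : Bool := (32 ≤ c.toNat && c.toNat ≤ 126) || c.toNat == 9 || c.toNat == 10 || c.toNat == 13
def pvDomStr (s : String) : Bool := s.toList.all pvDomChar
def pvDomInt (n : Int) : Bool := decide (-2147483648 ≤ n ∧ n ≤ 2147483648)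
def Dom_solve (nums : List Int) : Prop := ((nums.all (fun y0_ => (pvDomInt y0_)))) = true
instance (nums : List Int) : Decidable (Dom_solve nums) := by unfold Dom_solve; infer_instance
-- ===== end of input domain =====

-- B replaces A's three passes and three intermediate lists (prefix-max array, reversed
-- suffix-min array, zip scan) by a single forward pass keeping three scalars (O(1) extra space).

-- ===== PORT A =====
-- Python A: builds left_max, right_min (via the reversal slice nums[-2::-1], which on a
-- nonempty list is exactly nums.dropLast.reverse — ported by hand, exact incl. n = 1), then
-- scans enumerate(zip(left_max, right_min[1:])) (right_min[1:] = drop 1) for the first a <= b.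
def solve (nums : List Int) : Option Int :=
  match nums with
  | [] => none
  | x :: xs =>
    let leftMax := xs.foldl (fun acc num => acc ++ [max num acc.getLast!]) [x]
    let rightMin0 := ((x :: xs).dropLast.reverse).foldl
        (fun acc num => acc ++ [min num acc.getLast!]) [(x :: xs).getLast (by simp)]
    let rightMin := rightMin0.reverse
    (PySem.List.enumerate (leftMax.zip (rightMin.drop 1)) 0).findSome?
      (fun p => if p.2.1 ≤ p.2.2 then some (p.1 + 1) else none)

-- ===== PORT B =====
-- loop body of Source B: state (i, cut, cut_max, seen_max)
def stepB (st : Int × Int × Int × Int) (x : Int) : Int × Int × Int × Int :=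
  match st with
  | (i, cut, cutMax, seenMax) =>
    if x < cutMax then (i + 1, i + 1, seenMax, seenMax)
    else if x > seenMax then (i + 1, cut, cutMax, x)
    else (i + 1, cut, cutMax, seenMax)

def solve_alt (nums : List Int) : Option Int :=
  match nums with
  | [] => none
  | x :: xs =>
    let st := xs.foldl stepB (1, 1, x, x)
    if st.2.1 < ((x :: xs).length : Int) then some st.2.1 else none

-- ===== PRECONDITION & SPEC =====
def Spec_solve (nums : List Int) (out : Option Int) : Prop := out = solve_alt nums
instance (nums : List Int) (out : Option Int) : Decidable (Spec_solve nums out) := by unfold Spec_solve; infer_instance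

-- ===== CLAIM (what is proved, stated in full; the proofs are below) =====
def Claim_equal_solve : Prop := ∀ (nums : List Int), Dom_solve nums → Spec_solve nums (solve nums)

-- ===== LEMMAS AND PROOFS =====

-- common specification: gsp x ys = first k ≥ 1 splitting x::ys with max(left) ≤ min(right)
def gsp (x : Int) : List Int → Option Int
  | [] => none
  | y :: ys => if x ≤ ys.foldl min y then some 1 else (gsp (max y x) ys).map (· + 1)

-- the running-fold list A builds: pref f m l = [m, f l0 m, f l1 (f l0 m), …]
def pref (f : Int → Int → Int) (m : Int) : List Int → List Int
  | [] => [m]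
  | y :: l => m :: pref f (f y m) l

-- suffix minima of a::ys, from the left
def RM (a : Int) : List Int → List Int
  | [] => [a]
  | y :: ys => (y :: ys).foldl min a :: RM y ys

theorem foldl_min_assoc : ∀ (t : List Int) (y z : Int),
    min y (t.foldl min z) = t.foldl min (min y z) := by
  intro t
  induction t with
  | nil => intro y z; rfl
  | cons w t ih =>
    intro y z
    simp only [List.foldl_cons]
    rw [ih, min_assoc]

theorem foldApp (f : Int → Int → Int) :
    ∀ (l acc : List Int) (m : Int),
      l.foldl (fun acc num => acc ++ [f num acc.getLast!]) (acc ++ [m]) = acc ++ pref f m l := by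
  intro l
  induction l with
  | nil => intro acc m; simp only [List.foldl_nil, pref]
  | cons y t ih =>
    intro acc m
    simp only [List.foldl_cons, pref]
    have hlast : (acc ++ [m]).getLast! = m := by
      induction acc with
      | nil => rfl
      | cons a t iha => simpa [List.getLast!] using iha
    rw [hlast]
    have : acc ++ [m] ++ [f y m] = (acc ++ [m]) ++ [f y m] := by simp
    rw [show (acc ++ [m]) ++ [f y m] = (acc ++ [m]) ++ [f y m] from rfl]
    rw [ih (acc ++ [m]) (f y m)]
    simp [pref]

theorem pref_min_append : ∀ (u : List Int) (m x : Int),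
    pref min m (u ++ [x]) = pref min m u ++ [min x (u.foldl min m)] := by
  intro u
  induction u with
  | nil => intro m x; simp [pref]
  | cons y t ih =>
    intro m x
    simp only [List.cons_append, pref, List.foldl_cons]
    rw [ih]
    simp [min_comm y m]

-- running min over the reversed initial segment = foldl min over the tail
theorem runMin_rev : ∀ (ys : List Int) (y : Int),
    ((y :: ys).dropLast.reverse).foldl min ((y :: ys).getLast (by simp)) = ys.foldl min y := by
  intro ys
  induction ys with
  | nil => intro y; simp
  | cons z t ih =>
    intro y
    have h1 : (y :: z :: t).dropLast = y :: (z :: t).dropLast := by simp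
    have h2 : (y :: z :: t).getLast (by simp) = (z :: t).getLast (by simp) := by
      simp [List.getLast_cons]
    rw [h1, h2]
    simp only [List.reverse_cons]
    rw [List.foldl_append]
    rw [ih z]
    simp only [List.foldl_cons, List.foldl_nil]
    rw [min_comm, foldl_min_assoc, min_comm y z]

-- A's right_min list equals RM
theorem rightMin_eq_RM : ∀ (xs : List Int) (x : Int),
    (((x :: xs).dropLast.reverse).foldl
        (fun acc num => acc ++ [min num acc.getLast!]) [(x :: xs).getLast (by simp)]).reverse
      = RM x xs := by
  intro xs
  induction xs with
  | nil => intro x; simp [RM]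
  | cons y ys ih =>
    intro x
    have h1 : (x :: y :: ys).dropLast = x :: (y :: ys).dropLast := by simp
    have h2 : (x :: y :: ys).getLast (by simp) = (y :: ys).getLast (by simp) := by
      simp [List.getLast_cons]
    rw [h1, h2]
    simp only [List.reverse_cons]
    have hfold := foldApp min ((y :: ys).dropLast.reverse ++ [x]) []
        ((y :: ys).getLast (by simp))
    simp only [List.nil_append] at hfold
    rw [hfold, pref_min_append]
    have hfold2 := foldApp min ((y :: ys).dropLast.reverse) []
        ((y :: ys).getLast (by simp))
    simp only [List.nil_append] at hfold2
    rw [← hfold2, runMin_rev]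
    simp only [List.reverse_append, List.reverse_cons, List.reverse_nil, List.nil_append]
    rw [ih y]
    simp only [RM, List.foldl_cons, List.cons_append, List.nil_append]
    rw [foldl_min_assoc]

theorem RM_drop1 : ∀ (ys : List Int) (a b : Int), (RM a ys).drop 1 = (RM b ys).drop 1 := by
  intro ys a b; cases ys <;> rfl

-- findSome? over enumerate: shifting the start index shifts the returned value
theorem scan_shift : ∀ (l : List (Int × Int)) (s : Int),
    (PySem.List.enumerate l s).findSome? (fun p => if p.2.1 ≤ p.2.2 then some (p.1 + 1) else none)
      = ((PySem.List.enumerate l 0).findSome?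
          (fun p => if p.2.1 ≤ p.2.2 then some (p.1 + 1) else none)).map (· + s) := by
  intro l
  induction l with
  | nil => intro s; simp [PySem.List.enumerate_nil]
  | cons q t ih =>
    intro s
    rw [PySem.List.enumerate_cons, PySem.List.enumerate_cons]
    simp only [List.findSome?_cons]
    by_cases hc : q.1 ≤ q.2
    · simp [hc, add_comm]
    · simp only [hc, if_false]
      rw [ih (s + 1), ih (0 + 1)]
      cases (PySem.List.enumerate t 0).findSome?
          (fun p => if p.2.1 ≤ p.2.2 then some (p.1 + 1) else none) with
      | none => simp
      | some v => simp; ring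

def scanF (lm rm : List Int) : Option Int :=
  (PySem.List.enumerate (lm.zip rm) 0).findSome?
    (fun p => if p.2.1 ≤ p.2.2 then some (p.1 + 1) else none)

theorem scanF_cons (a b : Int) (L R : List Int) :
    scanF (a :: L) (b :: R) = if a ≤ b then some 1 else (scanF L R).map (· + 1) := by
  unfold scanF
  rw [List.zip_cons_cons, PySem.List.enumerate_cons]
  simp only [List.findSome?_cons]
  by_cases h : a ≤ b
  · simp [h]
  · simp only [h, if_neg, not_false_eq_true]
    rw [scan_shift (L.zip R) (0 + 1)]
    simp

-- A's core equals gsp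
theorem scan_eq_gsp : ∀ (xs : List Int) (x : Int),
    scanF (pref max x xs) ((RM x xs).drop 1) = gsp x xs := by
  intro xs
  induction xs with
  | nil => intro x; simp [pref, RM, scanF, gsp, PySem.List.enumerate_nil]
  | cons y ys ih =>
    intro x
    have hRM : (RM x (y :: ys)).drop 1 = RM y ys := by simp [RM]
    rw [hRM]
    have hRMdec : RM y ys = ys.foldl min y :: (RM y ys).drop 1 := by
      cases ys <;> simp [RM]
    rw [hRMdec]
    simp only [pref]
    rw [scanF_cons]
    rw [RM_drop1 ys y (max y x)]
    rw [ih (max y x)]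
    rfl

theorem solveA_eq_gsp : ∀ (x : Int) (xs : List Int), solve (x :: xs) = gsp x xs := by
  intro x xs
  show (PySem.List.enumerate _ 0).findSome? _ = _
  have hl := foldApp max xs [] x
  simp only [List.nil_append] at hl
  rw [← scan_eq_gsp xs x]
  unfold scanF
  rw [hl, rightMin_eq_RM xs x]

-- ===== B side =====

def FB (d : Nat) (m s : Int) (ys : List Int) : Option Int :=
  let st := ys.foldl stepB (1 + (d : Int), 1, m, s)
  if st.2.1 < 1 + (d : Int) + (ys.length : Int) then some st.2.1 else none

theorem foldl_stepB_shift : ∀ (ys : List Int) (i c m s e : Int),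
    ys.foldl stepB (i + e, c + e, m, s)
      = ((ys.foldl stepB (i, c, m, s)).1 + e, (ys.foldl stepB (i, c, m, s)).2.1 + e,
         (ys.foldl stepB (i, c, m, s)).2.2) := by
  intro ys
  induction ys with
  | nil => intro i c m s e; rfl
  | cons y t ih =>
    intro i c m s e
    simp only [List.foldl_cons, stepB]
    split_ifs with h1 h2
    · rw [show i + e + 1 = (i + 1) + e by ring, ih]
    · have := ih (i + 1) c m y e
      rw [show i + 1 + e = i + e + 1 by ring] at this
      exact this
    · have := ih (i + 1) c m s e
      rw [show i + 1 + e = i + e + 1 by ring] at this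
      exact this

theorem FB_nil (d : Nat) (m s : Int) : FB d m s [] = if 0 < d then some 1 else none := by
  unfold FB
  simp only [List.foldl_nil, List.length_nil, Nat.cast_zero, add_zero]
  split_ifs with h1 h2 <;> first | rfl | omega

theorem FB_cons (d : Nat) (m s y : Int) (t : List Int) :
    FB d m s (y :: t)
      = if y < m then (FB 0 s s t).map (· + (1 + (d : Int)))
        else FB (d + 1) m (max s y) t := by
  by_cases h : y < m
  · simp only [h, if_true]
    unfold FB
    simp only [List.foldl_cons, stepB, h, if_true, Nat.cast_zero, add_zero,
      List.length_cons]
    rw [show (1 + (d : Int) + 1 : Int) = 1 + (1 + (d : Int)) by ring]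
    rw [foldl_stepB_shift t 1 1 s s (1 + (d : Int))]
    by_cases hlt : (t.foldl stepB (1, 1, s, s)).2.1 < 1 + (t.length : Int)
    · rw [if_pos (by push_cast; omega), if_pos hlt]
      exact congrArg some (by ring)
    · rw [if_neg (by push_cast; omega), if_neg hlt]
      rfl
  · simp only [h, if_false]
    unfold FB
    simp only [List.foldl_cons, stepB, h, if_false, List.length_cons]
    rcases lt_or_ge s y with h2 | h2
    · rw [if_pos h2, max_eq_right h2.le]
      push_cast
      ring_nf
    · rw [if_neg (not_lt.mpr h2), max_eq_left h2]
      push_cast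
      ring_nf

theorem le_foldl_min : ∀ (ys : List Int) (y s : Int),
    s ≤ y → (∀ z ∈ ys, s ≤ z) → s ≤ ys.foldl min y := by
  intro ys
  induction ys with
  | nil => intro y s h _; exact h
  | cons z t ih =>
    intro y s h hall
    simp only [List.foldl_cons]
    exact ih (min y z) s (le_min h (hall z (by simp))) (fun w hw => hall w (by simp [hw]))

theorem gsp_all (s : Int) : ∀ (t : List Int), (∀ z ∈ t, s ≤ z) →
    gsp s t = if 0 < t.length then some 1 else none := by
  intro t
  cases t with
  | nil => intro _; rfl
  | cons y ys =>
    intro hall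
    have : s ≤ ys.foldl min y :=
      le_foldl_min ys y s (hall y (by simp)) (fun z hz => hall z (by simp [hz]))
    simp [gsp, this]

theorem foldl_min_le_self : ∀ (t : List Int) (a : Int), t.foldl min a ≤ a := by
  intro t
  induction t with
  | nil => intro a; exact le_refl a
  | cons z t ih => intro a; exact le_trans (ih (min a z)) (min_le_left a z)

theorem foldl_min_le_mem : ∀ (t : List Int) (a z : Int), z ∈ t → t.foldl min a ≤ z := by
  intro t
  induction t with
  | nil => intro a z hz; cases hz
  | cons w t ih =>
    intro a z hz
    rcases List.mem_cons.mp hz with rfl | hz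
    · exact le_trans (foldl_min_le_self t (min a z)) (min_le_right a z)
    · exact ih (min a w) z hz

theorem FB_eq : ∀ (ys : List Int) (d : Nat) (m s : Int), m ≤ s →
    FB d m s ys = if (∀ z ∈ ys, m ≤ z) then (if 0 < d + ys.length then some 1 else none)
      else (gsp s ys).map (· + (d : Int)) := by
  intro ys
  induction ys with
  | nil =>
    intro d m s _
    rw [FB_nil]
    simp
  | cons y t ih =>
    intro d m s hms
    rw [FB_cons]
    by_cases h : y < m
    · rw [if_pos h]
      have hnall : ¬ (∀ z ∈ y :: t, m ≤ z) := by
        intro hall; exact absurd (hall y (by simp)) (not_le.mpr h)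
      rw [if_neg hnall]
      have hbase : FB 0 s s t = gsp s t := by
        rw [ih 0 s s le_rfl]
        by_cases hall : ∀ z ∈ t, s ≤ z
        · rw [if_pos hall, gsp_all s t hall]; simp
        · rw [if_neg hall]
          cases gsp s t <;> simp
      rw [hbase]
      have hcond : ¬ (s ≤ t.foldl min y) := by
        have h1 : t.foldl min y ≤ y := foldl_min_le_self t y
        omega
      simp only [gsp]
      rw [if_neg hcond, max_eq_right (le_of_lt (lt_of_lt_of_le h hms))]
      cases gsp s t with
      | none => rfl
      | some v => simp only [Option.map_some]; rw [add_assoc]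
    · rw [if_neg h]
      have hmy : m ≤ y := not_lt.mp h
      rw [ih (d + 1) m (max s y) (le_trans hms (le_max_left s y))]
      by_cases hallt : ∀ z ∈ t, m ≤ z
      · have hall : ∀ z ∈ y :: t, m ≤ z := by
          intro z hz
          rcases List.mem_cons.mp hz with rfl | hz
          · exact hmy
          · exact hallt z hz
        rw [if_pos hallt, if_pos hall]
        rw [if_pos (by omega), if_pos (by simp only [List.length_cons]; omega)]
      · have hnall : ¬ ∀ z ∈ y :: t, m ≤ z :=
          fun hall => hallt (fun z hz => hall z (List.mem_cons_of_mem y hz))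
        rw [if_neg hallt, if_neg hnall]
        have hcond : ¬ (s ≤ t.foldl min y) := by
          push Not at hallt
          obtain ⟨z, hz, hzlt⟩ := hallt
          have h1 : t.foldl min y ≤ z := foldl_min_le_mem t y z hz
          omega
        simp only [gsp]
        rw [if_neg hcond, max_comm y s]
        cases gsp (max s y) t with
        | none => rfl
        | some v =>
          simp only [Option.map_some]
          exact congrArg some (by push_cast; ring)

theorem solveB_eq_gsp : ∀ (x : Int) (xs : List Int), solve_alt (x :: xs) = gsp x xs := by
  intro x xs
  have h0 : solve_alt (x :: xs) = FB 0 x x xs := by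
    unfold solve_alt FB
    simp only [List.length_cons, Nat.cast_zero, add_zero, Nat.cast_add, Nat.cast_one]
    rw [add_comm ((xs.length : Int)) 1]
  rw [h0, FB_eq xs 0 x x le_rfl]
  by_cases hall : ∀ z ∈ xs, x ≤ z
  · rw [if_pos hall, gsp_all x xs hall]; simp
  · rw [if_neg hall]
    cases gsp x xs <;> simp

-- ===== VERDICT (by name: the statement is the Claim_ definition above) =====
theorem solve_spec : Claim_equal_solve := by
  intro nums _
  unfold Spec_solve
  cases nums with
  | nil => rfl
  | cons x xs => rw [solveA_eq_gsp, solveB_eq_gsp]
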